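-- pv_equiv track=rewrite | github.com/waffleprinter/project_euler | problem 62.py | has_same_length_permutation
-- ===== SOURCE A (Python) =====
-- def is_permutation_of(n1, n2):
--     return sorted(str(n1)) == sorted(str(n2))
--
-- def has_same_length_permutation(n, target):
--     if target == 1:
--         return True
--
--     n2 = n + 1
--
--     while len(str(n ** 3)) == len(str(n2 ** 3)):
--         if is_permutation_of(n ** 3, n2 ** 3):
--             return has_same_length_permutation(n2, target - 1)
--
--         n2 += 1
--
--     return False
-- ===== SOURCE B (Python) =====
-- def has_same_length_permutation(n, target):
--     # Two staged passes: collect the sorted-digit keys of every cube in the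
--     # same-digit-length run after n, then compare a count. Digit-permutation
--     # of cubes is an equivalence, so the whole chain shares n's key and the
--     # cubes' digit length; the chain exists iff enough keys equal n's key.
--     if target == 1:
--         return True
--     length = len(str(n ** 3))
--     key = sorted(str(n ** 3))
--     keys = []
--     m = n + 1
--     while len(str(m ** 3)) == length:
--         keys.append(sorted(str(m ** 3)))
--         m += 1
--     return target > 1 and keys.count(key) >= target - 1
-- ===== Notes on version B (the rewrite author's own statement) =====
-- stated objective: alternative
-- what changed: Replaces A's tail recursion with restarting inner scans by two staged passes: one pass collects the sorted-digit keys of every cube in the same-digit-length run, then a count of keys equal to n's key (computed once) is compared against target - 1, using that cube-digit-permutation is an equivalence so the whole chain shares n's key and cube length.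
import Mathlib
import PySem

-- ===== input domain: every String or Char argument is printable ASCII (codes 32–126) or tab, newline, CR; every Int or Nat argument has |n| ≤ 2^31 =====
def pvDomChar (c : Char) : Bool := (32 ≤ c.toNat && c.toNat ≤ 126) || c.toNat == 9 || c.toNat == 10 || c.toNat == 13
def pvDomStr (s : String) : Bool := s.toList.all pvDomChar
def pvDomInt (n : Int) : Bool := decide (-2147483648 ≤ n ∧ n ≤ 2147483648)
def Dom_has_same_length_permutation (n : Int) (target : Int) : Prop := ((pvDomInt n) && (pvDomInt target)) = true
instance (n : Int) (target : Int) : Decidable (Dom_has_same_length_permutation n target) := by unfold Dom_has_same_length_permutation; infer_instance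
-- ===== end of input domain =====

-- B replaces A's restarting recursive scans by two staged passes — collect the run's sorted-digit keys, then compare a count of n's key against target - 1 (digit-permutation of cubes is an equivalence); equivalence proved on all inputs.


-- ===== PORT A =====
-- the 'while' loop of A, scanning n2 upward; the tail call `has_same_length_permutation(n2, target - 1)`
-- is transcribed inline (it first re-checks `target - 1 == 1`, then re-enters the loop from `n2 + 1`).
-- `fuel` is a totality guard only: the wrapper passes more steps than the scan can take
-- (the scan stops before n2 reaches 10 ^ len(str(n³)), since such cubes have more digits).
def hslp_while : Nat → Int → Int → Int → Bool
  | 0, _, _, _ => false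
  | fuel + 1, n, target, n2 =>
    if (PySem.Int.toChars (n ^ 3)).length = (PySem.Int.toChars (n2 ^ 3)).length then
      if PySem.List.sorted (PySem.Int.toChars (n ^ 3)) (fun c => c) false =
          PySem.List.sorted (PySem.Int.toChars (n2 ^ 3)) (fun c => c) false then
        if target - 1 = 1 then true
        else hslp_while fuel n2 (target - 1) (n2 + 1)
      else hslp_while fuel n target (n2 + 1)
    else false

def has_same_length_permutation (n : Int) (target : Int) : Bool :=
  if target = 1 then true
  else
    hslp_while (((10:Int) ^ (PySem.Int.toChars (n ^ 3)).length - n).toNat + 1) n target (n + 1)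

-- ===== PORT B =====
-- pass 1 of B: collect the sorted-digit keys of all cubes in the same-length run after n;
-- Python's `keys.append(...)` loop becomes a tail-recursive accumulator (prepended, reversed
-- at the end — the standard transcription of an appending loop); `fuel` is the same totality
-- guard as in port A.
def hslp_keys : Nat → Nat → Int → List (List Char) → List (List Char)
  | 0, _, _, acc => acc.reverse
  | fuel + 1, length, m, acc =>
    if (PySem.Int.toChars (m ^ 3)).length = length then
      hslp_keys fuel length (m + 1)
        (PySem.List.sorted (PySem.Int.toChars (m ^ 3)) (fun c => c) false :: acc)
    else acc.reverse

def has_same_length_permutation_alt (n : Int) (target : Int) : Bool :=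
  if target = 1 then true
  else
    decide (1 < target) &&
      decide ((PySem.List.count
          (hslp_keys (((10:Int) ^ (PySem.Int.toChars (n ^ 3)).length - n).toNat + 1)
            (PySem.Int.toChars (n ^ 3)).length (n + 1) [])
          (PySem.List.sorted (PySem.Int.toChars (n ^ 3)) (fun c => c) false) : Int)
        ≥ target - 1)

-- ===== PRECONDITION & SPEC =====
def Spec_has_same_length_permutation (n : Int) (target : Int) (out : Bool) : Prop := out = has_same_length_permutation_alt n target
instance (n : Int) (target : Int) (out : Bool) : Decidable (Spec_has_same_length_permutation n target out) := by unfold Spec_has_same_length_permutation; infer_instance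

-- ===== CLAIM (what is proved, stated in full; the proofs are below) =====
def Claim_equal_has_same_length_permutation : Prop := ∀ (n : Int) (target : Int), Dom_has_same_length_permutation n target → Spec_has_same_length_permutation n target (has_same_length_permutation n target)

-- ===== LEMMAS AND PROOFS =====

-- the accumulator of pass 1 is a reversed prefix of the final list
lemma pv_keys_acc :
    ∀ (fuel : Nat) (l : Nat) (m : Int) (acc : List (List Char)),
      hslp_keys fuel l m acc = acc.reverse ++ hslp_keys fuel l m [] := by
  intro fuel
  induction fuel with
  | zero => intro l m acc; simp [hslp_keys]
  | succ fuel ih =>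
    intro l m acc
    by_cases hc : (PySem.Int.toChars (m ^ 3)).length = l
    · rw [hslp_keys, hslp_keys, if_pos hc, if_pos hc, ih, ih l (m + 1) [_]]
      simp
    · rw [hslp_keys, hslp_keys, if_neg hc, if_neg hc]
      simp

-- with the same fuel, A's restarting loop equals "at least target - 1 of the run's keys match":
-- every chain member shares the cube-digit length `l` and the sorted-digit key `key` of the start
lemma pv_while_eq_count (l : Nat) (key : List Char) :
    ∀ (fuel : Nat) (n target n2 : Int),
      (PySem.Int.toChars (n ^ 3)).length = l →
      PySem.List.sorted (PySem.Int.toChars (n ^ 3)) (fun c => c) false = key →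
      target ≠ 1 →
      hslp_while fuel n target n2 =
        (decide (1 < target) &&
          decide ((PySem.List.count (hslp_keys fuel l n2 []) key : Int) ≥ target - 1)) := by
  intro fuel
  induction fuel with
  | zero =>
    intro n target n2 _ _ ht
    simp [hslp_while, hslp_keys, PySem.List.count_eq]
  | succ fuel ih =>
    intro n target n2 hL hK ht
    by_cases hc : (PySem.Int.toChars (n2 ^ 3)).length = l
    · have hcw : (PySem.Int.toChars (n ^ 3)).length = (PySem.Int.toChars (n2 ^ 3)).length := by
        rw [hL, hc]
      have hkeys : hslp_keys (fuel + 1) l n2 [] =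
          PySem.List.sorted (PySem.Int.toChars (n2 ^ 3)) (fun c => c) false ::
            hslp_keys fuel l (n2 + 1) [] := by
        rw [hslp_keys, if_pos hc, pv_keys_acc]
        simp
      rw [hslp_while, if_pos hcw, hkeys]
      by_cases hkey : PySem.List.sorted (PySem.Int.toChars (n2 ^ 3)) (fun c => c) false = key
      · rw [if_pos (hK.trans hkey.symm)]
        have hcount : (PySem.List.count
            (PySem.List.sorted (PySem.Int.toChars (n2 ^ 3)) (fun c => c) false ::
              hslp_keys fuel l (n2 + 1) []) key : Int) =
            (PySem.List.count (hslp_keys fuel l (n2 + 1) []) key : Int) + 1 := by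
          simp [PySem.List.count_eq, hkey]
        by_cases h1 : target - 1 = 1
        · rw [if_pos h1, hcount]
          have : target = 2 := by omega
          subst this
          simp
        · rw [if_neg h1, ih n2 (target - 1) (n2 + 1) hc hkey h1, hcount]
          by_cases h2 : 1 < target
          · have h3 : 1 < target - 1 := by omega
            simp [h2, h3]
          · have h3 : ¬ 1 < target - 1 := by omega
            simp [h2, h3]
      · have hkw : ¬ PySem.List.sorted (PySem.Int.toChars (n ^ 3)) (fun c => c) false =
            PySem.List.sorted (PySem.Int.toChars (n2 ^ 3)) (fun c => c) false := by
          rw [hK]; exact fun he => hkey he.symm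
        rw [if_neg hkw, ih n target (n2 + 1) hL hK ht]
        have : PySem.List.count
            (PySem.List.sorted (PySem.Int.toChars (n2 ^ 3)) (fun c => c) false ::
              hslp_keys fuel l (n2 + 1) []) key =
            PySem.List.count (hslp_keys fuel l (n2 + 1) []) key := by
          simp [PySem.List.count_eq, hkey]
        rw [this]
    · have hcw : ¬ (PySem.Int.toChars (n ^ 3)).length = (PySem.Int.toChars (n2 ^ 3)).length := by
        rw [hL]; exact fun he => hc he.symm
      rw [hslp_while, hslp_keys, if_neg hcw, if_neg hc]
      simp [PySem.List.count_eq]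

-- ===== VERDICT (by name: the statement is the Claim_ definition above) =====
theorem has_same_length_permutation_spec : Claim_equal_has_same_length_permutation := by
  intro n target _
  unfold Spec_has_same_length_permutation
  rw [has_same_length_permutation, has_same_length_permutation_alt]
  by_cases ht : target = 1
  · rw [if_pos ht, if_pos ht]
  · rw [if_neg ht, if_neg ht]
    exact pv_while_eq_count _ _ _ n target (n + 1) rfl rfl ht
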